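-- pv_equiv track=rewrite | github.com/Quantco/spox | tools/generate_opset.py | get_constructor_name
-- ===== SOURCE A (Python) =====
-- CONSTRUCTOR_RENAMES = {
--     "if": "if_",
--     "or": "or_",
--     "and": "and_",
--     "not": "not_",
--     "is_na_n": "isnan",
--     "is_inf": "isinf",
--     "mat_mul": "matmul",
--     "mat_mul_integer": "matmul_integer",
--     "qlinear_mat_mul": "qlinear_matmul",
--     "cum_sum": "cumsum",
-- }
--
-- def get_constructor_name(string: str) -> str:
--     """Jinja filter. Returns the name of a constructor given the base name of an operator."""
--     lim = [
--         i
--         for i, (x, y) in enumerate(zip(string[1:], string[2:]), 2)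
--         if not x.isupper() and y.isupper()
--     ]
--     lim = [0] + lim + [len(string)]
--     result = "_".join([string[i:j] for i, j in zip(lim, lim[1:])]).lower()
--     if result in CONSTRUCTOR_RENAMES:
--         result = CONSTRUCTOR_RENAMES[result]
--     return result
-- ===== SOURCE B (Python) =====
-- CONSTRUCTOR_RENAMES = {
--     "if": "if_",
--     "or": "or_",
--     "and": "and_",
--     "not": "not_",
--     "is_na_n": "isnan",
--     "is_inf": "isinf",
--     "mat_mul": "matmul",
--     "mat_mul_integer": "matmul_integer",
--     "qlinear_mat_mul": "qlinear_matmul",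
--     "cum_sum": "cumsum",
-- }
--
-- def get_constructor_name(string: str) -> str:
--     """Jinja filter. Returns the name of a constructor given the base name of an operator."""
--     out = []
--     prev = ""
--     for i, c in enumerate(string):
--         if i >= 2 and c.isupper() and not prev.isupper():
--             out.append("_")
--         out.append(c.lower())
--         prev = c
--     result = "".join(out)
--     return CONSTRUCTOR_RENAMES.get(result, result)
-- ===== Notes on version B (the rewrite author's own statement) =====
-- stated objective: simpler
-- what changed: Replaces A's three-pass pipeline (compute boundary indices from zipped shifted strings, slice at consecutive boundary pairs, join with '_' then lowercase) by a single forward pass that emits '_' before each uppercase char at index >= 2 whose predecessor is not uppercase and lowercases each char as it goes, then applies the same rename lookup.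
import Mathlib
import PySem

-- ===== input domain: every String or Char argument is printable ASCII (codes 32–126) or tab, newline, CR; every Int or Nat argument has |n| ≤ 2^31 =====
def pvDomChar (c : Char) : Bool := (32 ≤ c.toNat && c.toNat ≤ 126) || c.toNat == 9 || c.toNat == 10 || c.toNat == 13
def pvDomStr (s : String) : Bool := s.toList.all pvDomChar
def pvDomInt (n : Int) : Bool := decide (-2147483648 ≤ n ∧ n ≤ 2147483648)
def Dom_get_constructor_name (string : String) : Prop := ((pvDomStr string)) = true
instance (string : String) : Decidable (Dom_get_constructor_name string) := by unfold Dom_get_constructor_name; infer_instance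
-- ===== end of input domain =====

-- B replaces A's boundary-index/slice/join pipeline by a single forward pass that inserts '_' and lowercases as it goes (objective: simpler one-pass decomposition).

def pvRenames : PySem.Dict String String := PySem.Dict.ofList
  [("if", "if_"), ("or", "or_"), ("and", "and_"), ("not", "not_"),
   ("is_na_n", "isnan"), ("is_inf", "isinf"), ("mat_mul", "matmul"),
   ("mat_mul_integer", "matmul_integer"), ("qlinear_mat_mul", "qlinear_matmul"),
   ("cum_sum", "cumsum")]

-- ===== PORT A =====
def get_constructor_name (string : String) : String :=
  let s := string.toList
  -- lim = [i for i,(x,y) in enumerate(zip(string[1:], string[2:]), 2) if not x.isupper() and y.isupper()]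
  let lim0 : List Int :=
    ((PySem.List.enumerate ((PySem.List.slice s (some 1) none).zip (PySem.List.slice s (some 2) none)) 2).filter
      (fun p => !(PySem.Chars.isupper p.2.1) && PySem.Chars.isupper p.2.2)).map (·.1)
  -- lim = [0] + lim + [len(string)]
  let lim : List Int := 0 :: lim0 ++ [(s.length : Int)]
  -- result = "_".join([string[i:j] for i, j in zip(lim, lim[1:])]).lower()
  let result := PySem.Chars.lower
    (PySem.Chars.join ['_'] ((lim.zip lim.tail).map (fun p => PySem.List.slice s (some p.1) (some p.2))))
  -- if result in CONSTRUCTOR_RENAMES: result = CONSTRUCTOR_RENAMES[result]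
  match PySem.Dict.get? pvRenames (String.ofList result) with
  | some r => r
  | none => String.ofList result

-- ===== PORT B =====
-- the loop body of Source B; prev starts as "" (never uppercase), ported as Option Char with none for ""
def pvStep (st : List Char × Option Char) (p : Int × Char) : List Char × Option Char :=
  let acc := if (decide (2 ≤ p.1) && PySem.Chars.isupper p.2
                 && !(match st.2 with | some q => PySem.Chars.isupper q | none => false))
             then st.1 ++ ['_'] else st.1
  (acc ++ [PySem.Chars.lowerChar p.2], some p.2)

def get_constructor_name_alt (string : String) : String :=
  let result := ((PySem.List.enumerate string.toList 0).foldl pvStep ([], none)).1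
  PySem.Dict.getD pvRenames (String.ofList result) (String.ofList result)

-- ===== PRECONDITION & SPEC =====
def Spec_get_constructor_name (string : String) (out : String) : Prop := out = get_constructor_name_alt string
instance (string : String) (out : String) : Decidable (Spec_get_constructor_name string out) := by unfold Spec_get_constructor_name; infer_instance

-- ===== CLAIM (what is proved, stated in full; the proofs are below) =====
def Claim_equal_get_constructor_name : Prop := ∀ (string : String), Dom_get_constructor_name string → Spec_get_constructor_name string (get_constructor_name string)

-- ===== LEMMAS AND PROOFS =====

-- reference shape: the characters from position 2 on, p the previous character
def pvGo (p : Char) : List Char → List Char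
  | [] => []
  | c :: cs => (if !PySem.Chars.isupper p && PySem.Chars.isupper c then ['_', c] else [c]) ++ pvGo c cs

-- boundary indices produced by A's list comprehension, generalized (p at position j-1, rest from j)
def pvBnd (j : Int) (p : Char) (rest : List Char) : List Int :=
  ((PySem.List.enumerate ((p :: rest).zip rest) j).filter
    (fun q => !(PySem.Chars.isupper q.2.1) && PySem.Chars.isupper q.2.2)).map (·.1)

-- suffix-with-underscores built from a cut list (t = s.drop j)
def pvIns (j : Int) (t : List Char) : List Int → List Char
  | [] => t
  | l :: L => t.take (l - j).toNat ++ '_' :: pvIns l (t.drop (l - j).toNat) L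

lemma pvBnd_nil (p : Char) (j : Int) : pvBnd j p [] = [] := by
  simp [pvBnd, PySem.List.enumerate_nil]

lemma pvBnd_cons (p c : Char) (rest : List Char) (j : Int) :
    pvBnd j p (c :: rest) =
      (if (!(PySem.Chars.isupper p) && PySem.Chars.isupper c) = true then [j] else []) ++ pvBnd (j+1) c rest := by
  unfold pvBnd
  rw [List.zip_cons_cons, PySem.List.enumerate_cons, List.filter_cons]
  split_ifs with h <;> simp_all

lemma pvBnd_ge : ∀ (rest : List Char) (p : Char) (j : Int), ∀ l ∈ pvBnd j p rest, j ≤ l := by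
  intro rest
  induction rest with
  | nil => intro p j l hl; simp [pvBnd_nil] at hl
  | cons c rest ih =>
    intro p j l hl
    rw [pvBnd_cons] at hl
    by_cases hc : (!(PySem.Chars.isupper p) && PySem.Chars.isupper c) = true
    · rw [if_pos hc, List.singleton_append] at hl
      rcases List.mem_cons.1 hl with rfl | h
      · exact le_refl _
      · have := ih c (j+1) l h; omega
    · rw [if_neg hc, List.nil_append] at hl
      have := ih c (j+1) l hl; omega

lemma pvBnd_pairwise : ∀ (rest : List Char) (p : Char) (j : Int), (pvBnd j p rest).Pairwise (· ≤ ·) := by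
  intro rest
  induction rest with
  | nil => intro p j; simp [pvBnd_nil]
  | cons c rest ih =>
    intro p j
    rw [pvBnd_cons]
    by_cases hc : (!(PySem.Chars.isupper p) && PySem.Chars.isupper c) = true
    · rw [if_pos hc, List.singleton_append]
      exact List.Pairwise.cons (fun l hl => by have := pvBnd_ge rest c (j+1) l hl; omega) (ih c (j+1))
    · rw [if_neg hc, List.nil_append]
      exact ih c (j+1)

lemma pvIns_cons (c : Char) (t : List Char) (j : Int) (L : List Int) (h : ∀ l ∈ L, j + 1 ≤ l) :
    pvIns j (c :: t) L = c :: pvIns (j + 1) t L := by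
  cases L with
  | nil => rfl
  | cons l L' =>
    have h1 : j + 1 ≤ l := h l (List.mem_cons_self ..)
    have h2 : (l - j).toNat = (l - (j+1)).toNat + 1 := by omega
    simp only [pvIns, h2, List.take_succ_cons, List.drop_succ_cons, List.cons_append]

lemma pvIns_bnd : ∀ (rest : List Char) (p : Char) (j : Int), pvIns j rest (pvBnd j p rest) = pvGo p rest := by
  intro rest
  induction rest with
  | nil => intro p j; simp [pvBnd_nil, pvIns, pvGo]
  | cons c rest ih =>
    intro p j
    rw [pvBnd_cons]
    have hge : ∀ l ∈ pvBnd (j+1) c rest, j + 1 ≤ l := pvBnd_ge rest c (j+1)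
    by_cases hc : (!(PySem.Chars.isupper p) && PySem.Chars.isupper c) = true
    · rw [if_pos hc, List.singleton_append]
      have h0 : (j - j).toNat = 0 := by omega
      simp only [pvIns, h0, List.take_zero, List.drop_zero, List.nil_append]
      rw [pvIns_cons c rest j _ hge, ih c (j+1)]
      simp [pvGo, hc]
    · rw [if_neg hc, List.nil_append]
      rw [pvIns_cons c rest j _ hge, ih c (j+1)]
      simp [pvGo, hc]

lemma pvJoin_slices (s : List Char) : ∀ (L : List Int) (j : Int), 0 ≤ j → ((j :: L).Pairwise (· ≤ ·)) →
    PySem.Chars.join ['_']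
      (((j :: (L ++ [(s.length : Int)])).zip (L ++ [(s.length : Int)])).map
        (fun p => PySem.List.slice s (some p.1) (some p.2)))
      = pvIns j (s.drop j.toNat) L := by
  intro L
  induction L with
  | nil =>
    intro j hj _
    simp only [List.nil_append, List.zip_cons_cons, List.zip_nil_right,
      List.map_cons, List.map_nil]
    rw [PySem.Chars.join_singleton]
    rw [PySem.List.slice_toNat s hj (Int.natCast_nonneg s.length)]
    simp only [Int.toNat_natCast, pvIns]
    exact List.take_of_length_le (by simp)
  | cons l L' ih =>
    intro j hj hpw
    have hjl : j ≤ l := (List.pairwise_cons.1 hpw).1 l (List.mem_cons_self ..)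
    have hpw' : (l :: L').Pairwise (· ≤ ·) := (List.pairwise_cons.1 hpw).2
    have hl : 0 ≤ l := le_trans hj hjl
    rcases hLM : L' ++ [(s.length : Int)] with _ | ⟨m, M⟩
    · exact absurd hLM (by simp)
    · have hih := ih l hl hpw'
      rw [hLM] at hih
      simp only [List.zip_cons_cons, List.map_cons] at hih
      simp only [List.cons_append]
      rw [hLM]
      simp only [List.zip_cons_cons, List.map_cons]
      rw [PySem.Chars.join_cons_cons, hih]
      rw [PySem.List.slice_toNat s hj hl]
      simp only [pvIns]
      have e1 : (l - j).toNat = l.toNat - j.toNat := by omega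
      have e2 : List.drop (l.toNat - j.toNat) (List.drop j.toNat s) = List.drop l.toNat s := by
        rw [List.drop_drop]; congr 1; omega
      rw [e1, e2]
      simp [List.append_assoc]

lemma pvBfold : ∀ (rest : List Char) (acc : List Char) (p : Char) (j : Int), 2 ≤ j →
    ((PySem.List.enumerate rest j).foldl pvStep (acc, some p)).1
      = acc ++ (pvGo p rest).map PySem.Chars.lowerChar := by
  intro rest
  induction rest with
  | nil => intro acc p j _; simp [PySem.List.enumerate_nil, pvGo]
  | cons c rest ih =>
    intro acc p j hj
    rw [PySem.List.enumerate_cons, List.foldl_cons]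
    have h2 : decide (2 ≤ j) = true := by simpa using hj
    have hlow : PySem.Chars.lowerChar '_' = '_' := by decide
    simp only [pvStep, h2, Bool.true_and]
    rw [ih _ c (j+1) (by omega)]
    by_cases hp : PySem.Chars.isupper p <;> by_cases hu : PySem.Chars.isupper c <;>
      simp [pvGo, hp, hu, hlow, List.append_assoc]

lemma pvLower_eq_map (l : List Char) : PySem.Chars.lower l = l.map PySem.Chars.lowerChar := rfl

lemma pvCore (s : List Char) :
    PySem.Chars.lower
      (PySem.Chars.join ['_']
        ((((0 : Int) :: (((PySem.List.enumerate ((PySem.List.slice s (some 1) none).zip (PySem.List.slice s (some 2) none)) 2).filter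
              (fun p => !(PySem.Chars.isupper p.2.1) && PySem.Chars.isupper p.2.2)).map (·.1)) ++ [(s.length : Int)]).zip
            (((0 : Int) :: (((PySem.List.enumerate ((PySem.List.slice s (some 1) none).zip (PySem.List.slice s (some 2) none)) 2).filter
              (fun p => !(PySem.Chars.isupper p.2.1) && PySem.Chars.isupper p.2.2)).map (·.1)) ++ [(s.length : Int)]).tail)).map
          (fun p => PySem.List.slice s (some p.1) (some p.2))))
      = ((PySem.List.enumerate s 0).foldl pvStep ([], none)).1 := by
  simp only [List.cons_append, List.tail_cons]
  have hs1 : PySem.List.slice s (some 1) none = s.tail := PySem.List.slice_from_one s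
  have hs2 : PySem.List.slice s (some 2) none = s.drop 2 := by
    rw [PySem.List.slice_from s (by norm_num : (0:Int) ≤ 2)]
    rfl
  rw [hs1, hs2]
  match s with
  | [] => decide
  | [a] => rfl
  | a :: b :: rest =>
    have hbnd : (((PySem.List.enumerate (((a :: b :: rest).tail).zip ((a :: b :: rest).drop 2)) 2).filter
        (fun p => !(PySem.Chars.isupper p.2.1) && PySem.Chars.isupper p.2.2)).map (·.1)) = pvBnd 2 b rest := rfl
    rw [hbnd]
    have hge2 : ∀ l ∈ pvBnd 2 b rest, (2 : Int) ≤ l := pvBnd_ge rest b 2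
    have hpw : ((0 : Int) :: pvBnd 2 b rest).Pairwise (· ≤ ·) :=
      List.Pairwise.cons (fun l hl => by have := hge2 l hl; omega) (pvBnd_pairwise rest b 2)
    rw [pvJoin_slices (a :: b :: rest) (pvBnd 2 b rest) 0 le_rfl hpw]
    simp only [Int.toNat_zero, List.drop_zero]
    rw [pvIns_cons a (b :: rest) 0 _ (fun l hl => by have := hge2 l hl; omega)]
    rw [show (0 : Int) + 1 = 1 by norm_num]
    rw [pvIns_cons b rest 1 _ (fun l hl => by have := hge2 l hl; omega)]
    rw [show (1 : Int) + 1 = 2 by norm_num, pvIns_bnd rest b 2]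
    -- B side: unroll the first two loop iterations
    rw [PySem.List.enumerate_cons, PySem.List.enumerate_cons, List.foldl_cons, List.foldl_cons]
    have s1 : pvStep ([], none) (0, a) = ([PySem.Chars.lowerChar a], some a) := by
      simp [pvStep]
    have s2 : pvStep ([PySem.Chars.lowerChar a], some a) (0 + 1, b)
        = ([PySem.Chars.lowerChar a, PySem.Chars.lowerChar b], some b) := by
      simp [pvStep]
    rw [s1, s2, pvBfold rest _ b (0 + 1 + 1) (by norm_num)]
    simp [pvLower_eq_map]

theorem get_constructor_name_spec : Claim_equal_get_constructor_name := by
  intro string _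
  unfold Spec_get_constructor_name get_constructor_name get_constructor_name_alt
  simp only []
  rw [pvCore string.toList]
  rw [PySem.Dict.getD_eq_get?_getD]
  cases PySem.Dict.get? pvRenames
      (String.ofList ((PySem.List.enumerate string.toList 0).foldl pvStep ([], none)).1) <;> rfl
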